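-- pv_equiv track=rewrite | github.com/mtrejo0/SchoolWork | 6.009/past/quiz1 March/q1_practice_solutions/q1_practice_a_sol.py | all_consecutives
-- ===== SOURCE A (Python) =====
-- def all_consecutives(vals, n):
--     def helper(prev_set, m):
--         if m > len(vals): # tricky case
--             return set()
--         if m >= n:
--             return prev_set
--         if m == 0:
--             next_set = set((v,) for v in vals)
--         else:
--             next_set = set()
--             for seq in prev_set:
--                 next_val = seq[-1]+1
--                 if next_val in vals:
--                     next_set.add(seq + (next_val,))
--         return helper(next_set, m+1)
--     return helper(None, 0)
-- ===== SOURCE B (Python) =====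
-- def all_consecutives(vals, n):
--     set_v = set(vals)
--     result = set()
--     for v in vals:
--         if all(v + i in set_v for i in range(n)):
--             result.add(tuple(v + i for i in range(n)))
--     return result
-- ===== Notes on version B (the rewrite author's own statement) =====
-- stated objective: alternative
-- what changed: Instead of growing partial runs level by level through n recursive set-rebuilding passes, B makes a single pass that tests each candidate start v directly against a hash set (all of v..v+n-1 present) and emits the full run at once.
-- outside the precondition, e.g. on all_consecutives({1}, 0): A returns None, B returns {()}
import Mathlib
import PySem

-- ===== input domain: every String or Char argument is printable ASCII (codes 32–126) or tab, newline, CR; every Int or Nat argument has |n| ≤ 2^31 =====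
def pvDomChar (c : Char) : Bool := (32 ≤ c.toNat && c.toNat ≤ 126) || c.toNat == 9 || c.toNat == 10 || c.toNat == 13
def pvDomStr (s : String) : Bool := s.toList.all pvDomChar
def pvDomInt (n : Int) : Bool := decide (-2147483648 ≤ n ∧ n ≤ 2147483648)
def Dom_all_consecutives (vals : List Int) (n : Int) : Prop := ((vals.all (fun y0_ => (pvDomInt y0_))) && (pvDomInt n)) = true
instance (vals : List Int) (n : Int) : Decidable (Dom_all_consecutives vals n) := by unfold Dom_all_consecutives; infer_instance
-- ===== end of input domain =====

-- B replaces A's level-by-level extension of partial runs by a single pass that tests each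
-- candidate start value directly against a set (objective: alternative algorithm, same cost).

-- ===== PORT A =====
-- helper(prev_set, m); prev_set is None only at the initial call (m = 0), modelled as Option.
def acHelper (vals : List Int) (n : Int) (prev : Option (PySem.Set (List Int))) (m : Nat) :
    Option (PySem.Set (List Int)) :=
  if _h1 : m > vals.length then some PySem.Set.empty
  else if (m : Int) ≥ n then prev
  else
    let next : PySem.Set (List Int) :=
      if m = 0 then PySem.Set.ofList (vals.map (fun v => [v]))
      else
        -- for seq in prev_set: … (prev is not None here since m ≥ 1)
        (prev.getD PySem.Set.empty).foldl
          (fun next seq =>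
            match PySem.List.pyGet? seq (-1) with   -- seq[-1]; every seq in prev_set is nonempty
            | some last => if (last + 1) ∈ vals then PySem.Set.add next (seq ++ [last + 1]) else next
            | none => next)
          PySem.Set.empty
    acHelper vals n (some next) (m + 1)
termination_by vals.length + 1 - m
decreasing_by omega

-- helper(None, 0); the `.getD []` only covers Python's `None` result (n ≤ 0), which Pre_ excludes.
def all_consecutives (vals : List Int) (n : Int) : List (List Int) :=
  (acHelper vals n none 0).getD []

-- ===== PORT B =====
def all_consecutives_alt (vals : List Int) (n : Int) : List (List Int) :=
  let set_v : PySem.Set Int := PySem.Set.ofList vals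
  vals.foldl
    (fun result v =>
      if (PySem.List.pyRange 0 n).all (fun i => PySem.Set.contains set_v (v + i)) then
        PySem.Set.add result ((PySem.List.pyRange 0 n).map (fun i => v + i))
      else result)
    PySem.Set.empty

-- ===== PRECONDITION & SPEC =====
-- Pre_ excludes n ≤ 0, where A returns the sentinel None instead of a set (not a value of the declared return type).
def Pre_all_consecutives (vals : List Int) (n : Int) : Prop := 1 ≤ n
instance (vals : List Int) (n : Int) : Decidable (Pre_all_consecutives vals n) := by
  unfold Pre_all_consecutives; infer_instance

def pvWitness_all_consecutives : List Int × Int := ([1, 2, 3, 5, 6], 2)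

def Spec_all_consecutives (vals : List Int) (n : Int) (out : List (List Int)) : Prop := out = all_consecutives_alt vals n
instance (vals : List Int) (n : Int) (out : List (List Int)) : Decidable (Spec_all_consecutives vals n out) := by unfold Spec_all_consecutives; infer_instance

-- ===== CLAIM (what is proved, stated in full; the proofs are below) =====
def Claim_equal_all_consecutives : Prop := ∀ (vals : List Int) (n : Int), Dom_all_consecutives vals n → Pre_all_consecutives vals n → Spec_all_consecutives vals n (all_consecutives vals n)

-- ===== LEMMAS AND PROOFS =====

-- the canonical value both programs compute: the length-k runs, in first-occurrence order of their start
def acGood (vals : List Int) (k : Nat) (v : Int) : Bool :=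
  (List.range k).all (fun i => decide (v + (i : Int) ∈ vals))

def acRun (k : Nat) (v : Int) : List Int := (List.range k).map (fun (i : Nat) => v + (i : Int))

def acS (vals : List Int) (k : Nat) : List (List Int) :=
  ((PySem.List.dedup vals).filter (acGood vals k)).map (acRun k)

theorem acRun_injective (k : Nat) : Function.Injective (acRun (k + 1)) := by
  intro a b h
  have h0 : (acRun (k + 1) a)[0]? = (acRun (k + 1) b)[0]? := by rw [h]
  simpa [acRun] using h0

theorem acRun_succ (k : Nat) (v : Int) : acRun (k + 1) v = acRun k v ++ [v + (k : Int)] := by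
  simp [acRun, List.range_succ]

theorem acGood_succ (vals : List Int) (k : Nat) (v : Int) :
    acGood vals (k + 1) v = (acGood vals k v && decide (v + (k : Int) ∈ vals)) := by
  simp [acGood, List.range_succ]

-- a run of length k has k distinct members, all in vals
theorem acGood_le_length (vals : List Int) (k : Nat) (v : Int) (h : acGood vals k v = true) :
    k ≤ vals.length := by
  simp only [acGood, List.all_eq_true, decide_eq_true_eq] at h
  have hnd : ((List.range k).map (fun i : Nat => v + (i : Int))).Nodup := by
    refine List.Nodup.map ?_ List.nodup_range
    intro a b hab; simpa using hab
  have hsub : ((List.range k).map (fun i : Nat => v + (i : Int))).toFinset ⊆ vals.toFinset := by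
    intro x hx
    simp only [List.mem_toFinset, List.mem_map] at hx
    obtain ⟨i, hi, rfl⟩ := hx
    exact List.mem_toFinset.mpr (h i hi)
  have h1 : ((List.range k).map (fun i : Nat => v + (i : Int))).toFinset.card = k := by
    rw [List.toFinset_card_of_nodup hnd]; simp
  have h2 := Finset.card_le_card hsub
  have h3 := vals.toFinset_card_le
  omega

theorem ac_ofList_map_inj {f : Int → List Int} (hf : Function.Injective f) (l : List Int) :
    PySem.Set.ofList (l.map f) = (PySem.List.dedup l).map f := by
  induction l with
  | nil => rfl
  | cons x xs ih =>
    simp only [PySem.List.dedup_eq_ofList] at *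
    rw [List.map_cons, PySem.Set.ofList_cons, PySem.Set.ofList_cons, ih, List.map_cons]
    congr 1
    simp only [PySem.Set.discard, List.filter_map]
    congr 1
    apply List.filter_congr
    intro a _
    simp [hf.eq_iff]

theorem ac_dedup_filter (p : Int → Bool) (l : List Int) :
    PySem.List.dedup (l.filter p) = (PySem.List.dedup l).filter p := by
  induction l with
  | nil => rfl
  | cons x xs ih =>
    simp only [PySem.List.dedup_eq_ofList] at *
    by_cases hp : p x
    · rw [List.filter_cons_of_pos hp, PySem.Set.ofList_cons, PySem.Set.ofList_cons,
        List.filter_cons_of_pos hp]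
      simp only [PySem.Set.discard, ih, List.filter_filter]
      congr 1
      apply List.filter_congr
      intro a _
      by_cases hax : a = x <;> simp [hax, hp, Bool.and_comm]
    · rw [List.filter_cons_of_neg hp, PySem.Set.ofList_cons, List.filter_cons_of_neg hp, ih]
      simp only [PySem.Set.discard, List.filter_filter]
      apply (List.filter_congr ?_).symm
      intro a _
      by_cases hax : a = x <;> simp [hax, hp]

theorem acRun_last (k : Nat) (v : Int) :
    PySem.List.pyGet? (acRun (k + 1) v) (-1) = some (v + (k : Int)) := by
  rw [acRun_succ]
  simp [PySem.List.pyGet?, PySem.List.pyIdx?]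

-- one pass of A's inner 'for seq in prev_set' loop over the runs of length k+1
theorem acFoldStep (vals : List Int) (k : Nat) (W : List Int) (acc : PySem.Set (List Int)) :
    (W.map (acRun (k + 1))).foldl
      (fun next seq =>
        match PySem.List.pyGet? seq (-1) with
        | some last => if (last + 1) ∈ vals then PySem.Set.add next (seq ++ [last + 1]) else next
        | none => next) acc
    = PySem.Set.update acc ((W.filter (fun v => decide (v + ((k : Int) + 1) ∈ vals))).map (acRun (k + 2))) := by
  induction W generalizing acc with
  | nil => simp [PySem.Set.update]
  | cons v W ih =>
    rw [List.map_cons, List.foldl_cons, acRun_last]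
    by_cases hv : v + ((k : Int) + 1) ∈ vals
    · have hv' : v + (k : Int) + 1 ∈ vals := by rwa [← add_assoc] at hv
      rw [List.filter_cons_of_pos (by simpa using hv)]
      simp only [hv', if_true]
      rw [List.map_cons, PySem.Set.update_cons, ih]
      congr 2
      rw [show ((k : Nat) + 2) = (k + 1) + 1 from rfl, acRun_succ (k + 1)]
      push_cast
      rw [add_assoc]
    · have hv' : ¬ (v + (k : Int) + 1 ∈ vals) := by rwa [← add_assoc] at hv
      rw [List.filter_cons_of_neg (by simpa using hv)]
      simp only [hv', if_false]
      exact ih acc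

-- A's level step: from the runs of length k+1 to the runs of length k+2
theorem acStep (vals : List Int) (k : Nat) :
    (acS vals (k + 1)).foldl
      (fun next seq =>
        match PySem.List.pyGet? seq (-1) with
        | some last => if (last + 1) ∈ vals then PySem.Set.add next (seq ++ [last + 1]) else next
        | none => next) PySem.Set.empty
    = acS vals (k + 2) := by
  unfold acS
  rw [acFoldStep vals k _ PySem.Set.empty]
  rw [PySem.Set.update_empty]
  rw [List.filter_filter]
  have hpred : ((PySem.List.dedup vals).filter
      (fun a => decide (a + ((k : Int) + 1) ∈ vals) && acGood vals (k + 1) a))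
      = (PySem.List.dedup vals).filter (acGood vals (k + 2)) := by
    apply List.filter_congr
    intro a _
    rw [show (k : Nat) + 2 = (k + 1) + 1 from rfl, acGood_succ vals (k + 1) a]
    push_cast
    rw [Bool.and_comm]
  rw [hpred]
  apply PySem.Set.ofList_eq_self_of_nodup
  exact List.Nodup.map (acRun_injective (k + 1)) (List.Nodup.filter _ (PySem.List.nodup_dedup vals))

theorem acS_empty_of_gt (vals : List Int) (k : Nat) (hk : vals.length < k) :
    acS vals k = [] := by
  unfold acS
  rw [List.filter_eq_nil_iff.mpr, List.map_nil]
  intro a _ ha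
  exact absurd (acGood_le_length vals k a ha) (by omega)

-- invariant of A's recursion: at stage m ≥ 1 the carried set is exactly the runs of length m
theorem acHelper_inv (vals : List Int) (n : Int) (fuel : Nat) : ∀ (m : Nat),
    vals.length + 1 - m ≤ fuel → 1 ≤ m → (m : Int) ≤ n →
    acHelper vals n (some (acS vals m)) m = some (acS vals n.toNat) := by
  induction fuel with
  | zero =>
    intro m hf hm hmn
    have hgt : m > vals.length := by omega
    rw [acHelper, dif_pos hgt]
    rw [acS_empty_of_gt vals n.toNat (by omega)]
    rfl
  | succ fuel ih =>
    intro m hf hm hmn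
    rw [acHelper]
    by_cases hgt : m > vals.length
    · rw [dif_pos hgt]
      rw [acS_empty_of_gt vals n.toNat (by omega)]
      rfl
    · rw [dif_neg hgt]
      by_cases hge : (m : Int) ≥ n
      · rw [if_pos hge]
        have : m = n.toNat := by omega
        rw [this]
      · rw [if_neg hge]
        simp only [if_neg (by omega : ¬ m = 0), Option.getD_some]
        obtain ⟨k, rfl⟩ : ∃ k, m = k + 1 := ⟨m - 1, by omega⟩
        rw [acStep vals k]
        exact ih (k + 2) (by omega) (by omega) (by push_cast; omega)

theorem acA_eq (vals : List Int) (n : Int) (hn : 1 ≤ n) :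
    all_consecutives vals n = acS vals n.toNat := by
  unfold all_consecutives
  rw [acHelper, dif_neg (by omega : ¬ (0 > vals.length)), if_neg (by omega : ¬ ((0 : Nat) : Int) ≥ n)]
  simp only [reduceIte]
  have h1 : PySem.Set.ofList (vals.map (fun v => [v])) = acS vals 1 := by
    rw [ac_ofList_map_inj (fun a b h => by simpa using h) vals]
    unfold acS
    rw [List.filter_eq_self.mpr]
    · apply List.map_congr_left
      intro a _
      simp [acRun]
    · intro a ha
      simp only [acGood, List.range_one, List.all_cons, List.all_nil, Bool.and_true]
      simpa using (PySem.List.mem_dedup vals a).mp ha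
  rw [h1, acHelper_inv vals n vals.length 1 (by omega) le_rfl (by omega)]
  rfl

theorem acB_eq (vals : List Int) (n : Int) (hn : 1 ≤ n) :
    all_consecutives_alt vals n = acS vals n.toNat := by
  obtain ⟨k, hk⟩ : ∃ k, n.toNat = k + 1 := ⟨n.toNat - 1, by omega⟩
  have hn' : n = ((n.toNat : Nat) : Int) := by omega
  unfold all_consecutives_alt
  rw [hn', PySem.List.pyRange_zero_natCast]
  have hc : ∀ x : Int, PySem.Set.contains (PySem.Set.ofList vals) x = decide (x ∈ vals) := by
    intro x
    by_cases hx : x ∈ vals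
    · simp [PySem.Set.mem_ofList, hx]
    · simp only [hx, decide_false]
      rw [Bool.eq_false_iff]
      intro hcon
      exact hx ((PySem.Set.mem_ofList vals x).mp ((PySem.Set.contains_iff _ _).mp hcon))
  simp only [List.all_map, List.map_map, hc, Function.comp_def]
  have hfun : (fun (result : PySem.Set (List Int)) (v : Int) =>
      if ((List.range n.toNat).all fun x => decide (v + (x : Int) ∈ vals)) then
        PySem.Set.add result (List.map (fun (x : Nat) => v + (x : Int)) (List.range n.toNat))
      else result)
      = (fun (result : PySem.Set (List Int)) (v : Int) =>
          if acGood vals n.toNat v then PySem.Set.add result (acRun n.toNat v) else result) := by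
    funext result v
    simp only [acGood, acRun]
  rw [hfun]
  rw [PySem.List.foldl_if_eq_foldl_filter, ← PySem.Set.update_map_eq_foldl_add,
    PySem.Set.update_empty, hk, ac_ofList_map_inj (acRun_injective k), ac_dedup_filter]
  simp only [Int.toNat_natCast]
  rfl

-- ===== VERDICT (by name: the statement is the Claim_ definition above) =====
theorem all_consecutives_spec : Claim_equal_all_consecutives := by
  intro vals n _ hn
  unfold Spec_all_consecutives
  rw [acA_eq vals n hn, acB_eq vals n hn]
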